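-- pv_equiv track=rewrite | github.com/eunhee-dev/problem-solving | 0x08. stack (bracket matching)/10799번. 쇠막대기/solve.py | solve
-- ===== SOURCE A (Python) =====
-- def solve(target_str: str) -> int:
--     count = 0
--     open_brackets = 0
--     prev = ""
--
--     for ch in target_str:
--         if ch == "(":
--             open_brackets += 1
--         elif ch == ")":
--             open_brackets -= 1
--             if prev == "(":
--                 count += open_brackets
--             else:
--                 count += 1
--         prev = ch
--
--     return count
-- ===== SOURCE B (Python) =====
-- def solve(target_str: str) -> int:
--     # Stateless per-index formulation: classify each ")" by its predecessor;
--     # a laser's cut count is its bracket depth, recomputed from prefix counts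
--     # instead of being maintained in a running open/prev state.
--     total = 0
--     for i, ch in enumerate(target_str):
--         if ch == ")":
--             if i > 0 and target_str[i - 1] == "(":
--                 total += target_str[:i].count("(") - target_str[: i + 1].count(")")
--             else:
--                 total += 1
--     return total
-- ===== Notes on version B (the rewrite author's own statement) =====
-- stated objective: alternative
-- what changed: B drops A's running state (open_brackets counter and prev character): it classifies each closing bracket by its predecessor character and recomputes a laser's depth directly from prefix bracket counts of the string, trading A's stateful single pass for a stateless per-index formulation.
import Mathlib
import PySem

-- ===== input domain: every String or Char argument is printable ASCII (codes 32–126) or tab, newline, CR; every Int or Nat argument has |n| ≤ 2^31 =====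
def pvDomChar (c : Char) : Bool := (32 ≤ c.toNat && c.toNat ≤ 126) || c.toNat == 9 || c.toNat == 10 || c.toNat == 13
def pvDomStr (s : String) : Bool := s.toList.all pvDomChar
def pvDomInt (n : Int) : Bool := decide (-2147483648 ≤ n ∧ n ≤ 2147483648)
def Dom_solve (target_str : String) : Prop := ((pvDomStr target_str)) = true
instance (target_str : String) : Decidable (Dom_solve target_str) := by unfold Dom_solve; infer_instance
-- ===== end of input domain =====

-- B replaces A's stateful pass (running open count + previous character) by a stateless
-- per-index formulation: each ")" is classified by its predecessor and a laser's depth is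
-- recomputed from prefix bracket counts; alternative decomposition, same return value.

-- ===== PORT A =====
-- one step of A's for-loop: state = (count, open_brackets, prev)
def solveStep (st : Int × Int × String) (ch : Char) : Int × Int × String :=
  let count := st.1
  let opens := st.2.1
  let prev := st.2.2
  let st' :=
    if ch = '(' then (count, opens + 1)
    else if ch = ')' then
      let opens' := opens - 1
      if prev = "(" then (count + opens', opens') else (count + 1, opens')
    else (count, opens)
  (st'.1, st'.2, String.singleton ch)   -- prev = ch

def solve (target_str : String) : Int :=
  (target_str.toList.foldl solveStep (0, 0, "")).1

-- ===== PORT B =====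
-- B's loop body: p = (i, ch) from enumerate; str.count of a single char on a slice is
-- ported as List.count on the slice's characters (exact for s[:k].count(c))
def solveAltBody (l : List Char) (total i : Int) (ch : Char) : Int :=
  if ch = ')' then
    if 0 < i ∧ PySem.List.pyGet? l (i - 1) = some '(' then
      total + (((PySem.List.slice l none (some i)).count '(' : Int)
             - ((PySem.List.slice l none (some (i + 1))).count ')' : Int))
    else total + 1
  else total

def solveAltStep (l : List Char) (total : Int) (p : Int × Char) : Int :=
  solveAltBody l total p.1 p.2

def solve_alt (target_str : String) : Int :=
  (PySem.List.enumerate target_str.toList 0).foldl (solveAltStep target_str.toList) 0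

-- ===== PRECONDITION & SPEC =====
def Spec_solve (target_str : String) (out : Int) : Prop := out = solve_alt target_str
instance (target_str : String) (out : Int) : Decidable (Spec_solve target_str out) := by unfold Spec_solve; infer_instance

-- ===== CLAIM (what is proved, stated in full; the proofs are below) =====
def Claim_equal_solve : Prop := ∀ (target_str : String), Dom_solve target_str → Spec_solve target_str (solve target_str)

-- ===== LEMMAS AND PROOFS =====

-- A's prev variable after processing l
def prevStr (l : List Char) : String :=
  match l.getLast? with
  | none => ""
  | some c => String.singleton c

theorem singleton_eq_paren (c : Char) : String.singleton c = "(" ↔ c = '(' := by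
  constructor
  · intro h
    have := congrArg String.toList h
    simpa using this
  · rintro rfl; rfl

theorem prevStr_append (l : List Char) (c : Char) :
    prevStr (l ++ [c]) = String.singleton c := by
  unfold prevStr
  rw [List.getLast?_concat]

-- the loop body only reads l.take (i+1) and l[i-1] for an entry (i, _) of enumerate l 0,
-- so the prefix part of the fold does not see the appended character
theorem solveAltStep_append (l : List Char) (c : Char) (total : Int) (p : Int × Char)
    (hp : p ∈ PySem.List.enumerate l 0) :
    solveAltStep (l ++ [c]) total p = solveAltStep l total p := by
  obtain ⟨k, hk, rfl⟩ := (PySem.List.mem_enumerate_iff _ _ _).mp hp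
  unfold solveAltStep solveAltBody
  simp only [zero_add]
  rcases Nat.eq_zero_or_pos k with h0 | h0
  · subst h0
    simp
  · obtain ⟨m, rfl⟩ := Nat.exists_eq_add_of_lt h0
    simp only [Nat.zero_add] at *
    have hc1 : ((m + 1 : Nat) : Int) - 1 = (m : Int) := by push_cast; ring
    have h1 : PySem.List.pyGet? (l ++ [c]) (((m + 1 : Nat) : Int) - 1)
        = PySem.List.pyGet? l (((m + 1 : Nat) : Int) - 1) := by
      rw [hc1, PySem.List.pyGet?_natCast, PySem.List.pyGet?_natCast]
      rw [List.getElem?_append_left (by omega)]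
    have h2 : PySem.List.slice (l ++ [c]) none (some ((m + 1 : Nat) : Int))
        = PySem.List.slice l none (some ((m + 1 : Nat) : Int)) := by
      rw [PySem.List.slice_to_natCast, PySem.List.slice_to_natCast]
      rw [List.take_append_of_le_length (by omega)]
    have h3 : PySem.List.slice (l ++ [c]) none (some (((m + 1 : Nat) : Int) + 1))
        = PySem.List.slice l none (some (((m + 1 : Nat) : Int) + 1)) := by
      have e : ((m + 1 : Nat) : Int) + 1 = ((m + 2 : Nat) : Int) := by push_cast; ring
      rw [e, PySem.List.slice_to_natCast, PySem.List.slice_to_natCast]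
      rw [List.take_append_of_le_length (by omega)]
    rw [h1, h2, h3]

theorem count_bal_append (l : List Char) (c : Char) :
    (((l ++ [c]).count '(' : Int) - ((l ++ [c]).count ')' : Int))
      = ((l.count '(' : Int) - (l.count ')' : Int))
        + (if c = '(' then 1 else if c = ')' then (-1 : Int) else 0) := by
  by_cases h1 : c = '(' <;> by_cases h2 : c = ')' <;>
    simp_all [List.count_append] <;> ring

-- main invariant: A's full state after l versus B's fold; A's open_brackets is the
-- prefix bracket balance and A's prev is the last character
theorem main_inv (l : List Char) :
    l.foldl solveStep (0, 0, "")
      = ((PySem.List.enumerate l 0).foldl (solveAltStep l) 0,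
         (l.count '(' : Int) - (l.count ')' : Int),
         prevStr l) := by
  induction l using List.reverseRecOn with
  | nil => rfl
  | append_singleton l c ih =>
    rw [List.foldl_append, ih]
    rw [PySem.List.enumerate_append]
    rw [List.foldl_append]
    rw [PySem.List.foldl_congr_mem _ _ _ _ (fun acc x hx => solveAltStep_append l c acc x hx)]
    rw [prevStr_append]
    simp only [PySem.List.enumerate_cons, PySem.List.enumerate_nil, List.foldl_cons,
      List.foldl_nil, zero_add]
    set B := (PySem.List.enumerate l 0).foldl (solveAltStep l) 0 with hB
    by_cases hc : c = '('
    · subst hc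
      have hBstep : solveAltStep (l ++ ['(']) B ((l.length : Int), '(') = B := by
        show solveAltBody (l ++ ['(']) B (l.length : Int) '(' = B
        unfold solveAltBody
        rw [if_neg (by decide)]
      rw [hBstep, count_bal_append]
      simp [solveStep]
    · by_cases hc2 : c = ')'
      · subst hc2
        by_cases hlast : prevStr l = "("
        · -- previous char is '(' : a laser, B recomputes the depth from prefix counts
          have hnil : l ≠ [] := by rintro rfl; simp [prevStr] at hlast
          have hlastc : l.getLast hnil = '(' := by
            unfold prevStr at hlast
            rw [List.getLast?_eq_some_getLast hnil] at hlast
            exact (singleton_eq_paren _).mp hlast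
          have hlen : 0 < l.length := List.length_pos_of_ne_nil hnil
          have hA : solveStep (B, (l.count '(' : Int) - (l.count ')' : Int), prevStr l) ')'
              = (B + ((l.count '(' : Int) - (l.count ')' : Int) - 1),
                 (l.count '(' : Int) - (l.count ')' : Int) - 1, String.singleton ')') := by
            simp [solveStep, hlast]
          rw [hA]
          have hget : PySem.List.pyGet? (l ++ [')']) ((l.length : Int) - 1) = some '(' := by
            have e : ((l.length : Int)) - 1 = ((l.length - 1 : Nat) : Int) := by
              push_cast [hlen]; omega
            rw [e, PySem.List.pyGet?_natCast]
            rw [List.getElem?_append_left (by omega)]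
            rw [List.getElem?_eq_getElem (by omega)]
            simp only [List.getLast_eq_getElem] at hlastc
            simp [hlastc]
          have hcond : (0 : Int) < (l.length : Int)
              ∧ PySem.List.pyGet? (l ++ [')']) ((l.length : Int) - 1) = some '(' :=
            ⟨by exact_mod_cast hlen, hget⟩
          have e1 : PySem.List.slice (l ++ [')']) none (some (l.length : Int)) = l := by
            rw [PySem.List.slice_to_natCast, List.take_append_of_le_length (le_refl _)]
            simp
          have e2 : PySem.List.slice (l ++ [')']) none (some ((l.length : Int) + 1))
              = l ++ [')'] := by
            have e : (l.length : Int) + 1 = ((l.length + 1 : Nat) : Int) := by push_cast; ring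
            rw [e, PySem.List.slice_to_natCast]
            apply List.take_of_length_le; simp
          have hBstep : solveAltStep (l ++ [')']) B ((l.length : Int), ')')
              = B + ((l.count '(' : Int) - ((l.count ')' : Int) + 1)) := by
            show solveAltBody (l ++ [')']) B (l.length : Int) ')' = _
            unfold solveAltBody
            rw [if_pos rfl, if_pos hcond]
            rw [e1, e2]
            simp [List.count_append]
          rw [hBstep, count_bal_append]
          rw [if_neg (by decide), if_pos rfl]
          simp only [Prod.mk.injEq]
          refine ⟨by ring, by ring, trivial⟩
        · -- previous char is not '(' (or the string is empty): a bar end, both add 1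
          have hA : solveStep (B, (l.count '(' : Int) - (l.count ')' : Int), prevStr l) ')'
              = (B + 1, (l.count '(' : Int) - (l.count ')' : Int) - 1, String.singleton ')') := by
            simp [solveStep, hlast]
          rw [hA]
          have hcond : ¬ ((0 : Int) < (l.length : Int)
              ∧ PySem.List.pyGet? (l ++ [')']) ((l.length : Int) - 1) = some '(') := by
            rintro ⟨hpos, hget⟩
            have hlen : 0 < l.length := by exact_mod_cast hpos
            have hnil : l ≠ [] := List.ne_nil_of_length_pos hlen
            have e : ((l.length : Int)) - 1 = ((l.length - 1 : Nat) : Int) := by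
              push_cast [hlen]; omega
            rw [e, PySem.List.pyGet?_natCast] at hget
            rw [List.getElem?_append_left (by omega)] at hget
            rw [List.getElem?_eq_getElem (by omega)] at hget
            have hlastc : l.getLast hnil = '(' := by
              rw [List.getLast_eq_getElem]; simpa using hget
            apply hlast
            unfold prevStr
            rw [List.getLast?_eq_some_getLast hnil, hlastc]
            rfl
          have hBstep : solveAltStep (l ++ [')']) B ((l.length : Int), ')') = B + 1 := by
            show solveAltBody (l ++ [')']) B (l.length : Int) ')' = _
            unfold solveAltBody
            rw [if_pos rfl, if_neg hcond]
          rw [hBstep, count_bal_append]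
          rw [if_neg (by decide), if_pos rfl]
          simp only [Prod.mk.injEq]
          refine ⟨trivial, by ring, trivial⟩
      · -- any other character: both sides unchanged (up to A's prev variable)
        have hA : solveStep (B, (l.count '(' : Int) - (l.count ')' : Int), prevStr l) c
            = (B, (l.count '(' : Int) - (l.count ')' : Int), String.singleton c) := by
          simp [solveStep, hc, hc2]
        rw [hA]
        have hBstep : solveAltStep (l ++ [c]) B ((l.length : Int), c) = B := by
          show solveAltBody (l ++ [c]) B (l.length : Int) c = B
          unfold solveAltBody
          rw [if_neg hc2]
        rw [hBstep, count_bal_append]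
        simp [hc, hc2]

-- ===== VERDICT (by name: the statement is the Claim_ definition above) =====
theorem solve_spec : Claim_equal_solve := by
  intro s _
  unfold Spec_solve solve solve_alt
  rw [main_inv]
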